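-- pv_equiv track=rewrite | github.com/willf/NaNoGenMo-2016 | src/encrypt.py | convert
-- ===== SOURCE A (Python) =====
-- def convert(d, text):
--     buffer = list(text)
--     in_latex_cmd = False
--     in_latex_group = False
--     for i, ch in enumerate(buffer):
--         if in_latex_cmd:
--             buffer[i] = ch
--             if ch == '{' or ch == '}':
--                 in_latex_cmd = False
--         else:
--             if buffer[i].isupper():
--                 buffer[i] = d.get(ch.lower(), ch).upper()
--             else:
--                 buffer[i] = d.get(ch, ch)
--             if ch == '\\':
--                 in_latex_cmd = True
--     return "".join(buffer)
-- ===== SOURCE B (Python) =====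
-- def convert(d, text):
--     # one translation table for the distinct characters of text, then a
--     # segment-shaped pass: translate runs outside LaTeX commands, copy
--     # command bodies (up to and including the first brace) verbatim.
--     table = {c: (d.get(c.lower(), c).upper() if c.isupper() else d.get(c, c))
--              for c in set(text)}
--     return ''.join(_pieces(table, text))
--
--
-- def _pieces(table, s):
--     pre, sep, rest = s.partition('\\')
--     head = ''.join(table[c] for c in pre)
--     if not sep:
--         return [head]
--     n = _cmdlen(rest)
--     return [head, table['\\'] + rest[:n]] + _pieces(table, rest[n:])
--
--
-- def _cmdlen(s):
--     for j, c in enumerate(s):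
--         if c in '{}':
--             return j + 1
--     return len(s)
-- ===== Notes on version B (the rewrite author's own statement) =====
-- stated objective: idiomatic
-- what changed: Replaces A's per-character in_latex_cmd state machine (a dict lookup per character) by a translation table precomputed once over the distinct characters of text, plus a segment pass that partitions the text at backslashes, translates the stretches outside LaTeX commands, and copies each command body (up to and including its first brace) verbatim.
import Mathlib
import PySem

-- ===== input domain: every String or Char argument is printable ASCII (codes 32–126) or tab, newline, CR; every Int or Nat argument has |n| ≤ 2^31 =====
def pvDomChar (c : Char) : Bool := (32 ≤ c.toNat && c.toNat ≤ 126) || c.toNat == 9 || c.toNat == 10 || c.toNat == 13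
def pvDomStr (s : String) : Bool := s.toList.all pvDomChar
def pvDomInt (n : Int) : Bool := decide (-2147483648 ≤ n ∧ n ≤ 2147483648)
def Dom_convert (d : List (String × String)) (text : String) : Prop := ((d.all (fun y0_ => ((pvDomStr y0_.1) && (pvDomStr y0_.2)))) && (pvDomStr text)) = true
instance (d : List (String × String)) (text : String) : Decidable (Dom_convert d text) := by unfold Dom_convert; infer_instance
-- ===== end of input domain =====

-- B replaces A's per-character state flag by a precomputed per-character translation
-- table plus a segment pass (translate the stretches outside LaTeX commands, copy
-- command bodies verbatim); objective: idiomatic, same result on every input.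

-- ===== PORT A =====
-- one step of A's for-loop: state = (buffer of output pieces, in_latex_cmd flag)
def convertStep (d : List (String × String)) (st : List String × Bool) (ch : Char) : List String × Bool :=
  if st.2 then
    (st.1 ++ [String.ofList [ch]], if ch = '{' ∨ ch = '}' then false else true)
  else
    let rep : String :=
      if PySem.Chars.isupper ch then
        PySem.Str.upper (PySem.Dict.getD ⟨d⟩ (PySem.Str.lower (String.ofList [ch])) (String.ofList [ch]))
      else
        PySem.Dict.getD ⟨d⟩ (String.ofList [ch]) (String.ofList [ch])
    (st.1 ++ [rep], if ch = '\\' then true else false)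

def convert (d : List (String × String)) (text : String) : String :=
  PySem.Str.join "" ((text.toList.foldl (convertStep d) ([], false)).1)

-- ===== PORT B =====
-- the table entry for one character (body of Source B's dict comprehension)
def pvTr (d : List (String × String)) (c : Char) : String :=
  if PySem.Chars.isupper c then
    PySem.Str.upper (PySem.Dict.getD ⟨d⟩ (PySem.Str.lower (String.ofList [c])) (String.ofList [c]))
  else
    PySem.Dict.getD ⟨d⟩ (String.ofList [c]) (String.ofList [c])

-- table = {c: tr(c) for c in set(text)}
def pvTable (d : List (String × String)) (text : String) : PySem.Dict Char String :=
  (PySem.Set.ofList text.toList).foldl (fun t c => t.insert c (pvTr d c)) PySem.Dict.empty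

-- s.partition('\\') : the part before the first backslash, and (if one was found) the part after it
def pvPartBS : List Char → List Char × Option (List Char)
  | [] => ([], none)
  | c :: cs =>
    if c = '\\' then ([], some cs)
    else
      let r := pvPartBS cs
      (c :: r.1, r.2)

-- _cmdlen: length of the verbatim command body, up to and including the first brace
def pvCmdlen : List Char → Nat
  | [] => 0
  | c :: cs => if c = '{' ∨ c = '}' then 1 else pvCmdlen cs + 1

theorem pvPartBS_some_length (l pre rest : List Char) (h : pvPartBS l = (pre, some rest)) :
    rest.length < l.length := by
  induction l generalizing pre with
  | nil => simp [pvPartBS] at h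
  | cons c cs ih =>
    by_cases hc : c = '\\'
    · simp [pvPartBS, hc] at h
      simp [h.2]
    · simp only [pvPartBS, if_neg hc] at h
      have h2 := congrArg Prod.snd h
      simp only at h2
      have := ih (pvPartBS cs).1 (by rw [← h2])
      simp only [List.length_cons]
      omega

-- _pieces: translated stretch before the backslash, then backslash + verbatim body, then recurse
def pvPieces (t : PySem.Dict Char String) (s : List Char) : List String :=
  match h : pvPartBS s with
  | (pre, none) => [PySem.Str.join "" (pre.map (fun c => t.getD c (String.ofList [c])))]
  | (pre, some rest) =>
    let n := pvCmdlen rest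
    [PySem.Str.join "" (pre.map (fun c => t.getD c (String.ofList [c]))),
     t.getD '\\' "\\" ++ String.ofList (rest.take n)] ++ pvPieces t (rest.drop n)
termination_by s.length
decreasing_by
  have := pvPartBS_some_length s pre rest h
  have : rest.length - n ≤ rest.length := Nat.sub_le _ _
  simp only [List.length_drop]
  omega

def convert_alt (d : List (String × String)) (text : String) : String :=
  PySem.Str.join "" (pvPieces (pvTable d text) text.toList)

-- ===== PRECONDITION & SPEC =====
def Spec_convert (d : List (String × String)) (text : String) (out : String) : Prop := out = convert_alt d text
instance (d : List (String × String)) (text : String) (out : String) : Decidable (Spec_convert d text out) := by unfold Spec_convert; infer_instance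

-- ===== CLAIM (what is proved, stated in full; the proofs are below) =====
def Claim_equal_convert : Prop := ∀ (d : List (String × String)) (text : String), Dom_convert d text → Spec_convert d text (convert d text)

-- ===== LEMMAS AND PROOFS =====

-- A's loop as a flag-indexed recursion over the characters
def pvRunA (d : List (String × String)) : Bool → List Char → List String
  | _, [] => []
  | true, c :: cs => String.ofList [c] :: pvRunA d (if c = '{' ∨ c = '}' then false else true) cs
  | false, c :: cs => pvTr d c :: pvRunA d (if c = '\\' then true else false) cs

theorem pvFoldA (d : List (String × String)) (l : List Char) :
    ∀ (acc : List String) (b : Bool),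
      (l.foldl (convertStep d) (acc, b)).1 = acc ++ pvRunA d b l := by
  induction l with
  | nil => intro acc b; simp [pvRunA]
  | cons c cs ih =>
    intro acc b
    cases b with
    | true => simp [convertStep, pvRunA, List.foldl_cons, ih]
    | false => simp [convertStep, pvRunA, pvTr, List.foldl_cons, ih]

theorem pvJoinNilFlatten (ps : List (List Char)) : PySem.Chars.join "".toList ps = ps.flatten := by
  induction ps with
  | nil => simp [PySem.Chars.join_nil]
  | cons p q ih =>
    cases q with
    | nil => simp [PySem.Chars.join_singleton]
    | cons r s => rw [PySem.Chars.join_cons_cons]; simp_all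

theorem pvFlattenSingletons (cs : List Char) :
    (cs.map (String.toList ∘ fun c => String.ofList [c])).flatten = cs := by
  induction cs <;> simp_all

theorem pvPartBS_none (l : List Char) (h : (pvPartBS l).2 = none) :
    (pvPartBS l).1 = l ∧ '\\' ∉ l := by
  induction l with
  | nil => simp [pvPartBS]
  | cons c cs ih =>
    by_cases hc : c = '\\'
    · simp [pvPartBS, hc] at h
    · simp only [pvPartBS, if_neg hc] at h ⊢
      have := ih h
      simp [this.1, this.2, Ne.symm, hc]

theorem pvPartBS_some (l pre rest : List Char) (h : pvPartBS l = (pre, some rest)) :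
    l = pre ++ '\\' :: rest ∧ '\\' ∉ pre := by
  induction l generalizing pre with
  | nil => simp [pvPartBS] at h
  | cons c cs ih =>
    by_cases hc : c = '\\'
    · simp [pvPartBS, hc] at h
      simp [h.1, h.2, hc]
    · simp only [pvPartBS, if_neg hc] at h
      have h1 := congrArg Prod.fst h
      have h2 := congrArg Prod.snd h
      simp only at h1 h2
      have := ih (pvPartBS cs).1 (by rw [← h2])
      constructor
      · rw [← h1]; simp [← this.1]
      · rw [← h1]
        intro hm
        rcases List.mem_cons.mp hm with he | hm
        · exact hc he.symm
        · exact this.2 hm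

theorem pvRunA_noBS (d : List (String × String)) (l : List Char) (h : '\\' ∉ l) :
    pvRunA d false l = l.map (pvTr d) := by
  induction l with
  | nil => simp [pvRunA]
  | cons c cs ih =>
    simp only [List.mem_cons, not_or] at h
    simp [pvRunA, Ne.symm h.1, ih h.2]

theorem pvRunA_split (d : List (String × String)) (pre rest : List Char) (h : '\\' ∉ pre) :
    pvRunA d false (pre ++ '\\' :: rest) =
      pre.map (pvTr d) ++ pvTr d '\\' :: pvRunA d true rest := by
  induction pre with
  | nil => simp [pvRunA]
  | cons c cs ih =>
    simp only [List.mem_cons, not_or] at h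
    simp [pvRunA, Ne.symm h.1, ih h.2]

theorem pvRunA_cmd (d : List (String × String)) (rest : List Char) :
    pvRunA d true rest =
      (rest.take (pvCmdlen rest)).map (fun c => String.ofList [c]) ++
        pvRunA d false (rest.drop (pvCmdlen rest)) := by
  induction rest with
  | nil => simp [pvRunA, pvCmdlen]
  | cons c cs ih =>
    by_cases hc : c = '{' ∨ c = '}'
    · simp [pvRunA, pvCmdlen, hc]
    · simp [pvRunA, pvCmdlen, hc, ih]

theorem pvPiecesFlat (d : List (String × String)) (t : PySem.Dict Char String) (l : List Char)
    (H : ∀ c ∈ l, t.getD c (String.ofList [c]) = pvTr d c) :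
    ((pvPieces t l).map String.toList).flatten = ((pvRunA d false l).map String.toList).flatten := by
  rw [pvPieces]
  split
  next pre h =>
    obtain ⟨h1, h2⟩ := pvPartBS_none l (by rw [h])
    have hpre : pre = l := by rw [← h1, h]
    subst hpre
    rw [pvRunA_noBS d pre h2]
    simp only [List.map_cons, List.map_nil, List.flatten_cons, List.flatten_nil,
      List.append_nil, PySem.Str.toList_join, pvJoinNilFlatten, List.map_map]
    congr 1
    exact List.map_congr_left fun c hc => by
      simp only [Function.comp_apply]; rw [H c hc]
  next pre rest h =>
    obtain ⟨h1, h2⟩ := pvPartBS_some l pre rest h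
    subst h1
    have Hpre : ∀ c ∈ pre, t.getD c (String.ofList [c]) = pvTr d c :=
      fun c hc => H c (by simp [hc])
    have hbs : t.getD '\\' "\\" = pvTr d '\\' := H '\\' (by simp)
    have hrec := pvPiecesFlat d t (rest.drop (pvCmdlen rest)) (fun c hc => H c (by
      simp only [List.mem_append, List.mem_cons]
      exact Or.inr (Or.inr (List.mem_of_mem_drop hc))))
    rw [pvRunA_split d pre rest h2, pvRunA_cmd d rest]
    simp only [List.cons_append, List.nil_append, List.map_cons, List.flatten_cons,
      PySem.Str.toList_join, String.toList_append, hrec, List.map_append,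
      List.flatten_append, List.map_map, pvJoinNilFlatten, hbs,
      String.toList_ofList, List.append_assoc, pvFlattenSingletons]
    congr 2
    exact List.map_congr_left fun c hc => by
      simp only [Function.comp_apply]; rw [Hpre c hc]
termination_by l.length
decreasing_by
  rename_i h'
  have := pvPartBS_some_length _ _ _ h'
  simp only [List.length_drop]
  omega

theorem pvTableGet (d : List (String × String)) (text : String) (c : Char) (hc : c ∈ text.toList) :
    (pvTable d text).getD c (String.ofList [c]) = pvTr d c := by
  have hnd : (PySem.Set.ofList text.toList).Nodup := PySem.Set.nodup_ofList _
  have hitems : (pvTable d text).items =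
      (PySem.Set.ofList text.toList).map (fun a => (a, pvTr d a)) := by
    unfold pvTable
    have := PySem.Dict.items_foldl_insert_fresh (PySem.Set.ofList text.toList)
      (fun a => a) (fun a => pvTr d a) PySem.Dict.empty
      (fun a _ => PySem.Dict.contains_empty a) (by simp [hnd])
    simpa using this
  have hmem : (c, pvTr d c) ∈ (pvTable d text).items := by
    rw [hitems]
    exact List.mem_map_of_mem ((PySem.Set.mem_ofList _ _).mpr hc)
  refine PySem.Dict.getD_of_mem_items _ hmem ?_ _
  have : (pvTable d text).keys = PySem.Set.ofList text.toList := by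
    simp [PySem.Dict.keys, hitems, List.map_map, Function.comp_def]
  rw [this]; exact hnd

-- ===== VERDICT (by name: the statement is the Claim_ definition above) =====
theorem convert_spec : Claim_equal_convert := by
  intro d text _
  show convert d text = convert_alt d text
  apply String.toList_inj.mp
  unfold convert convert_alt
  rw [pvFoldA d text.toList [] false]
  simp only [List.nil_append, PySem.Str.toList_join, pvJoinNilFlatten]
  exact (pvPiecesFlat d (pvTable d text) text.toList
    (fun c hc => pvTableGet d text c hc)).symm
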